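-- pv_equiv track=rewrite | github.com/mahmedddd/ezsell | ezsell/ezsell/backend/ml_pipeline/advanced_feature_extractor.py | _get_mobile_brand_premium
-- ===== SOURCE A (Python) =====
-- def _get_mobile_brand_premium(text: str) -> int:
--     """Score brand premium (1-5)"""
--     if any(x in text for x in ['iphone', 'apple']):
--         return 5
--     elif any(x in text for x in ['samsung', 'oneplus', 'google', 'pixel']):
--         return 4
--     elif any(x in text for x in ['xiaomi', 'oppo', 'vivo', 'realme']):
--         return 3
--     elif any(x in text for x in ['infinix', 'tecno', 'itel']):
--         return 2
--     return 1
-- ===== SOURCE B (Python) =====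
-- _BRAND_SCORES = {
--     'iphone': 5, 'apple': 5,
--     'samsung': 4, 'oneplus': 4, 'google': 4, 'pixel': 4,
--     'xiaomi': 3, 'oppo': 3, 'vivo': 3, 'realme': 3,
--     'infinix': 2, 'tecno': 2, 'itel': 2,
-- }
--
-- def _get_mobile_brand_premium(text: str) -> int:
--     """Score brand premium (1-5)"""
--     return max((score for brand, score in _BRAND_SCORES.items() if brand in text),
--                default=1)
-- ===== Notes on version B (the rewrite author's own statement) =====
-- stated objective: simpler
-- what changed: Replaces the four-tier if/elif cascade of any() checks with a single flat brand->score table and one collect-matching-scores-then-max reduction with default 1.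
import Mathlib
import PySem

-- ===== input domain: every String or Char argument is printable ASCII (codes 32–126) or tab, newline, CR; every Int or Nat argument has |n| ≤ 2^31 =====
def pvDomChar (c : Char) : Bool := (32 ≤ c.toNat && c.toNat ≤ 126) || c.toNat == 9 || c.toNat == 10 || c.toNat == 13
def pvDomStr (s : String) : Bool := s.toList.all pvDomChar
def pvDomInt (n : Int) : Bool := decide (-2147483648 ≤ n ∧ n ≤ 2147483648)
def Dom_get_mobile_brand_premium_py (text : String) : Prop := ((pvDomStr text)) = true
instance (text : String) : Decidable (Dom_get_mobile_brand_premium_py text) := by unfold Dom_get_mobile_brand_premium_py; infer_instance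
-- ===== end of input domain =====

-- B replaces the four-tier any() cascade by a flat brand→score table and a
-- collect-matching-scores-then-max reduction (objective: simpler).

-- ===== PORT A =====
def get_mobile_brand_premium_py (text : String) : Int :=
  if (["iphone", "apple"].any fun x => PySem.Str.isIn x text) then 5
  else if (["samsung", "oneplus", "google", "pixel"].any fun x => PySem.Str.isIn x text) then 4
  else if (["xiaomi", "oppo", "vivo", "realme"].any fun x => PySem.Str.isIn x text) then 3
  else if (["infinix", "tecno", "itel"].any fun x => PySem.Str.isIn x text) then 2
  else 1

-- ===== PORT B =====
def pvBrandScores : List (String × Int) :=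
  [("iphone", 5), ("apple", 5),
   ("samsung", 4), ("oneplus", 4), ("google", 4), ("pixel", 4),
   ("xiaomi", 3), ("oppo", 3), ("vivo", 3), ("realme", 3),
   ("infinix", 2), ("tecno", 2), ("itel", 2)]

def get_mobile_brand_premium_py_alt (text : String) : Int :=
  (PySem.List.max?
    ((pvBrandScores.filter fun p => PySem.Str.isIn p.1 text).map Prod.snd)
    (fun s => s)).getD 1

-- ===== PRECONDITION & SPEC =====
def Spec_get_mobile_brand_premium_py (text : String) (out : Int) : Prop := out = get_mobile_brand_premium_py_alt text
instance (text : String) (out : Int) : Decidable (Spec_get_mobile_brand_premium_py text out) := by unfold Spec_get_mobile_brand_premium_py; infer_instance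

-- ===== CLAIM (what is proved, stated in full; the proofs are below) =====
def Claim_equal_get_mobile_brand_premium_py : Prop := ∀ (text : String), Dom_get_mobile_brand_premium_py text → Spec_get_mobile_brand_premium_py text (get_mobile_brand_premium_py text)

-- ===== LEMMAS AND PROOFS =====

-- max with default 1 over a list of values ≥ 1 is the running-max loop from 1.
theorem max_getD_eq_foldl (L : List Int) (h : ∀ x ∈ L, (1:Int) ≤ x) :
    (PySem.List.max? L (fun s => s)).getD 1 = L.foldl max 1 := by
  cases L with
  | nil =>
      have : PySem.List.max? ([] : List Int) (fun s => s) = none := by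
        exact (PySem.List.max?_eq_none_iff _ _).mpr rfl
      simp [this]
  | cons x t =>
      rw [PySem.List.max?_id_cons]
      have hx : max 1 x = x := max_eq_right (h x (by simp))
      simp [List.foldl_cons, hx]

-- one tier of constant score v contributes `max a v` iff one of its brands matches
theorem tier_foldl (p : String × Int → Bool) (v a : Int) (tier : List String) :
    ((((tier.map (fun s => (s, v))).filter p).map Prod.snd).foldl max a)
      = if tier.any (fun s => p (s, v)) then max a v else a := by
  induction tier generalizing a with
  | nil => simp
  | cons s t ih =>
      by_cases hp : p (s, v) = true
      · simp only [List.map_cons, List.filter_cons, hp, if_true,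
          List.foldl_cons, List.any_cons, Bool.true_or, if_true]
        rw [ih]
        by_cases ht : t.any (fun s => p (s, v)) = true
        · simp [ht]
        · simp [ht]
      · simp only [List.map_cons, List.filter_cons, hp, List.any_cons,
          Bool.false_eq_true, if_false, Bool.false_or]
        exact ih a

-- ===== VERDICT (by name: the statement is the Claim_ definition above) =====
theorem get_mobile_brand_premium_py_spec : Claim_equal_get_mobile_brand_premium_py := by
  intro text _
  unfold Spec_get_mobile_brand_premium_py
  unfold get_mobile_brand_premium_py get_mobile_brand_premium_py_alt
  set p : String × Int → Bool := fun q => PySem.Str.isIn q.1 text with hp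
  -- the flat table is four constant-score tiers
  have htab : pvBrandScores =
      (["iphone", "apple"].map (fun s => (s, (5:Int)))) ++
      (["samsung", "oneplus", "google", "pixel"].map (fun s => (s, (4:Int)))) ++
      (["xiaomi", "oppo", "vivo", "realme"].map (fun s => (s, (3:Int)))) ++
      (["infinix", "tecno", "itel"].map (fun s => (s, (2:Int)))) := by rfl
  -- every score in the table is ≥ 1, so max-with-default-1 is foldl max 1
  have hone : ∀ x ∈ ((pvBrandScores.filter p).map Prod.snd), (1:Int) ≤ x := by
    intro x hx
    rcases List.mem_map.mp hx with ⟨q, hq, rfl⟩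
    have hq' := (List.mem_filter.mp hq).1
    have hall : ∀ q ∈ pvBrandScores, (1:Int) ≤ q.2 := by decide
    exact hall q hq'
  rw [max_getD_eq_foldl _ hone, htab]
  simp only [List.filter_append, List.map_append, List.foldl_append]
  rw [tier_foldl p 5, tier_foldl p 4, tier_foldl p 3, tier_foldl p 2]
  simp only [hp, List.any_cons, List.any_nil, Bool.or_false]
  generalize (PySem.Str.isIn "iphone" text || PySem.Str.isIn "apple" text) = t1
  generalize (PySem.Str.isIn "samsung" text || (PySem.Str.isIn "oneplus" text ||
      (PySem.Str.isIn "google" text || PySem.Str.isIn "pixel" text))) = t2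
  generalize (PySem.Str.isIn "xiaomi" text || (PySem.Str.isIn "oppo" text ||
      (PySem.Str.isIn "vivo" text || PySem.Str.isIn "realme" text))) = t3
  generalize (PySem.Str.isIn "infinix" text || (PySem.Str.isIn "tecno" text ||
      PySem.Str.isIn "itel" text)) = t4
  revert t1 t2 t3 t4
  decide
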